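-- pv_equiv track=rewrite | github.com/jaeminSon/problem_solving | baekjoon/공장들.py | eulerian_technique
-- ===== SOURCE A (Python) =====
-- DP_MAX_LOG_HEIGHT = 19
--
-- def eulerian_technique(n, adjacency_list):
--     def _dfs(curr, parent):
--         count[0] += 1
--         start[curr] = count[0]
--         dp_parent[0][curr] = parent
--         depth[curr] = depth[parent] + 1
--         for nxt in adjacency_list[curr]:
--             if nxt != parent:
--                 dist[nxt] = dist[curr] + adjacency_list[curr][nxt]
--                 _dfs(nxt, curr)
--
--     count = [-1]
--     start = [-1] * n
--     dp_parent = [[-1] * n for _ in range(DP_MAX_LOG_HEIGHT)]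
--     depth = [-1] * n
--     dist = [0] * n
--
--     _dfs(0, -1)  # start with node of index==0
--
--     return start, dp_parent, depth, dist
-- ===== SOURCE B (Python) =====
-- # Iterative DFS with an explicit stack of frames (node, parent, remaining-items)
-- # replacing A's recursion; same arrays, same update order, same return value.
-- DP_MAX_LOG_HEIGHT = 19
--
-- def eulerian_technique(n, adjacency_list):
--     start = [-1] * n
--     dp_parent = [[-1] * n for _ in range(DP_MAX_LOG_HEIGHT)]
--     depth = [-1] * n
--     dist = [0] * n
--     time = -1
--     stack = [(0, -1, None)]
--     while stack:
--         curr, parent, pending = stack.pop()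
--         if pending is None:
--             time += 1
--             start[curr] = time
--             dp_parent[0][curr] = parent
--             depth[curr] = depth[parent] + 1
--             stack.append((curr, parent, list(adjacency_list[curr].items())))
--         elif pending:
--             nxt, w = pending[0]
--             stack.append((curr, parent, pending[1:]))
--             if nxt != parent:
--                 dist[nxt] = dist[curr] + w
--                 stack.append((nxt, curr, None))
--     return start, dp_parent, depth, dist
-- ===== Notes on version B (the rewrite author's own statement) =====
-- stated objective: alternative
-- what changed: A's recursive _dfs is replaced by an iterative while-loop over an explicit stack of (node, parent, remaining-neighbours) frames that performs the identical entry work and neighbour steps in the same order, so it computes the same four arrays without Python recursion.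
import Mathlib
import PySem

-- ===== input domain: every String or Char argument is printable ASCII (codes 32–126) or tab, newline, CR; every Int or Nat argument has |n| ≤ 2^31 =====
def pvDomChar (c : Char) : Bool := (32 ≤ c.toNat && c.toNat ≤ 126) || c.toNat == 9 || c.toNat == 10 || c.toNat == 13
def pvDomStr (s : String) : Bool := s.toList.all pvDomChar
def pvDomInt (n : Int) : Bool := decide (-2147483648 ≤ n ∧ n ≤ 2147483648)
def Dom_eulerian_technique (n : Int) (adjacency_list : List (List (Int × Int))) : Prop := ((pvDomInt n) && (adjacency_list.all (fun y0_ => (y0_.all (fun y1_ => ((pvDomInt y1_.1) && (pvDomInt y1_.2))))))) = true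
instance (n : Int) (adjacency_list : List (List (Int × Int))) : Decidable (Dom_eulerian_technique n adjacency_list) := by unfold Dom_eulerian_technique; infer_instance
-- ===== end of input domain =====

-- B re-implements A's recursive DFS as an iterative loop over an explicit stack of
-- (node, parent, remaining-neighbours) frames: same arrays, same update order, same value.

-- Shared array primitives (exact where Python indexing does not raise; where Python would
-- raise IndexError — excluded by Pre_ — pget returns 0 and pset leaves the list unchanged).
def pget (l : List Int) (i : Int) : Int := (PySem.List.pyGet? l i).getD 0
def pset (l : List Int) (i : Int) (v : Int) : List Int := PySem.List.pySetD l i v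
-- dp_parent[0][curr] = v  (row 0 always exists: dp_parent has DP_MAX_LOG_HEIGHT = 19 rows)
def dppSet (dpp : List (List Int)) (i : Int) (v : Int) : List (List Int) :=
  match dpp with
  | [] => []
  | r :: rs => pset r i v :: rs
-- adjacency_list[curr] (wrap-around get; [] where Python would raise, excluded by Pre_)
def pgetL (adj : List (List (Int × Int))) (i : Int) : List (Int × Int) :=
  (PySem.List.pyGet? adj i).getD []
-- the DFS state: count[0], start, dp_parent, depth, dist
structure EState where
  cnt : Int
  start : List Int
  dpp : List (List Int)
  depth : List Int
  dist : List Int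
deriving Repr, DecidableEq
-- fuel bound shared by both ports (a totality guard only; generous for every input Pre_ admits)
def fuelFor (n : Int) (adj : List (List (Int × Int))) : Nat :=
  (n.toNat + 1) * (2 + (adj.map List.length).sum) + 2

-- ===== PORT A =====
-- A's recursive _dfs: entry work, then the neighbour loop recursing into each child.
-- Fuel is threaded through (one unit per entry, per neighbour step and per loop exit);
-- it never runs out on inputs Pre_ admits. Iterating the dict's (key, value) items is
-- exact for `for nxt in d: d[nxt]` since a Python dict has no duplicate keys.
mutual
def dfsA (adj : List (List (Int × Int))) (fuel : Nat) (curr parent : Int) (s : EState) :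
    EState × {k : Nat // k ≤ fuel} :=
  match fuel with
  | 0 => (s, ⟨0, Nat.le_refl 0⟩)
  | f+1 =>
    let c := s.cnt + 1
    let s₁ : EState :=
      { cnt := c, start := pset s.start curr c, dpp := dppSet s.dpp curr parent,
        depth := pset s.depth curr (pget s.depth parent + 1), dist := s.dist }
    let r := loopA adj f curr parent (pgetL adj curr) s₁
    (r.1, ⟨r.2.1, Nat.le_succ_of_le r.2.2⟩)
termination_by (fuel, 0)
decreasing_by all_goals simp_wf; omega

def loopA (adj : List (List (Int × Int))) (fuel : Nat) (curr parent : Int)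
    (items : List (Int × Int)) (s : EState) : EState × {k : Nat // k ≤ fuel} :=
  match fuel with
  | 0 => (s, ⟨0, Nat.le_refl 0⟩)
  | f+1 =>
    match items with
    | [] => (s, ⟨f, Nat.le_succ f⟩)
    | (nxt, w) :: rest =>
      if nxt ≠ parent then
        let s₁ : EState := { s with dist := pset s.dist nxt (pget s.dist curr + w) }
        match dfsA adj f nxt curr s₁ with
        | (s₂, ⟨f', hf⟩) =>
          let r2 := loopA adj f' curr parent rest s₂
          (r2.1, ⟨r2.2.1, Nat.le_succ_of_le (Nat.le_trans r2.2.2 hf)⟩)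
      else
        let r := loopA adj f curr parent rest s
        (r.1, ⟨r.2.1, Nat.le_succ_of_le r.2.2⟩)
termination_by (fuel, 1)
decreasing_by all_goals simp_wf; omega
end

def eulerian_technique (n : Int) (adjacency_list : List (List (Int × Int))) :
    List Int × List (List Int) × List Int × List Int :=
  let s0 : EState :=
    { cnt := -1, start := List.replicate n.toNat (-1),
      dpp := List.replicate 19 (List.replicate n.toNat (-1)),
      depth := List.replicate n.toNat (-1), dist := List.replicate n.toNat 0 }
  let r := dfsA adjacency_list (fuelFor n adjacency_list) 0 (-1) s0
  (r.1.start, r.1.dpp, r.1.depth, r.1.dist)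

-- ===== PORT B =====
-- Source B's while-loop over the explicit stack; a frame is (curr, parent, pending) with
-- pending = none before the entry work, some items afterwards. One fuel unit per pop.
def runB (adj : List (List (Int × Int))) (fuel : Nat)
    (stack : List (Int × Int × Option (List (Int × Int)))) (s : EState) : EState :=
  match stack with
  | [] => s
  | (curr, parent, pending) :: rest =>
    match fuel with
    | 0 => s
    | f+1 =>
      match pending with
      | none =>
        let c := s.cnt + 1
        let s₁ : EState :=
          { cnt := c, start := pset s.start curr c, dpp := dppSet s.dpp curr parent,
            depth := pset s.depth curr (pget s.depth parent + 1), dist := s.dist }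
        runB adj f ((curr, parent, some (pgetL adj curr)) :: rest) s₁
      | some [] => runB adj f rest s
      | some ((nxt, w) :: ps) =>
        if nxt ≠ parent then
          let s₁ : EState := { s with dist := pset s.dist nxt (pget s.dist curr + w) }
          runB adj f ((nxt, curr, none) :: (curr, parent, some ps) :: rest) s₁
        else
          runB adj f ((curr, parent, some ps) :: rest) s

def eulerian_technique_alt (n : Int) (adjacency_list : List (List (Int × Int))) :
    List Int × List (List Int) × List Int × List Int :=
  let s0 : EState :=
    { cnt := -1, start := List.replicate n.toNat (-1),
      dpp := List.replicate 19 (List.replicate n.toNat (-1)),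
      depth := List.replicate n.toNat (-1), dist := List.replicate n.toNat 0 }
  let r := runB adjacency_list (fuelFor n adjacency_list) [(0, -1, none)] s0
  (r.start, r.dpp, r.depth, r.dist)

-- ===== PRECONDITION & SPEC =====
-- Pre_ helpers: the set of nodes the DFS visits (closure of {0} under the adjacency keys),
-- inside [0, min n (len adjacency_list)) — the indices on which every array access is valid.
def pvKeysOf (adj : List (List (Int × Int))) (i : Nat) : List Int :=
  (adj.getD i []).map Prod.fst
def pvGrow (adj : List (List (Int × Int))) (nn : Nat) (S : List Nat) : List Nat :=
  (List.range nn).filter (fun j => j ∈ S || S.any (fun i => (j : Int) ∈ pvKeysOf adj i))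
def pvReach (adj : List (List (Int × Int))) (nn : Nat) : List Nat :=
  (pvGrow adj nn)^[nn] [0]
def pvEdges (adj : List (List (Int × Int))) (R : List Nat) : List (Nat × Nat) :=
  (R.flatMap (fun i => ((pvKeysOf adj i).filter (fun j => 0 ≤ j)).map
    (fun j => (Nat.min i j.toNat, Nat.max i j.toNat)))).dedup
-- Pre_: node 0's component R (the nodes the DFS walks) is an undirected tree whose nodes
-- carry only valid keys: every key of a node of R lies in [0, min n (len adjacency_list)),
-- is not a self-loop and is not duplicated (the root may also carry key -1, which the
-- DFS skips as its parent), and R carries exactly |R| - 1 distinct undirected edges.  Outside Pre_ the Python A either raises (IndexError on an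
-- out-of-range key or when n < 1, RecursionError on a cycle through node 0's component)
-- or its value is an artefact (negative-key index wraparound, double visits of a node
-- reached by two edge copies); on the excluded inputs where A still returns, B returns the
-- same value (see the cites in the claim).  n need not equal len(adjacency_list): A never
-- compares them, and nodes outside R are never read, so both stay unconstrained.
def Pre_eulerian_technique (n : Int) (adjacency_list : List (List (Int × Int))) : Prop :=
  1 ≤ n ∧
  (∀ i ∈ pvReach adjacency_list (Nat.min n.toNat adjacency_list.length),
      i < Nat.min n.toNat adjacency_list.length ∧
      (pvKeysOf adjacency_list i).Nodup ∧
      ∀ j ∈ pvKeysOf adjacency_list i, (i = 0 ∧ j = -1) ∨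
        (0 ≤ j ∧ j < (Nat.min n.toNat adjacency_list.length : Int) ∧ j ≠ (i : Int))) ∧
  (pvEdges adjacency_list (pvReach adjacency_list (Nat.min n.toNat adjacency_list.length))).length + 1 =
    (pvReach adjacency_list (Nat.min n.toNat adjacency_list.length)).length
instance (n : Int) (adjacency_list : List (List (Int × Int))) : Decidable (Pre_eulerian_technique n adjacency_list) := by unfold Pre_eulerian_technique; infer_instance
def pvWitness_eulerian_technique : Int × (List (List (Int × Int))) :=
  (3, [[(1, 5), (2, 7)], [(0, 5)], [(0, 7)]])
def Spec_eulerian_technique (n : Int) (adjacency_list : List (List (Int × Int))) (out : List Int × List (List Int) × List Int × List Int) : Prop := out = eulerian_technique_alt n adjacency_list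
instance (n : Int) (adjacency_list : List (List (Int × Int))) (out : List Int × List (List Int) × List Int × List Int) : Decidable (Spec_eulerian_technique n adjacency_list out) := by unfold Spec_eulerian_technique; infer_instance

-- ===== CLAIM (what is proved, stated in full; the proofs are below) =====
def Claim_equal_eulerian_technique : Prop := ∀ (n : Int) (adjacency_list : List (List (Int × Int))), Dom_eulerian_technique n adjacency_list → Pre_eulerian_technique n adjacency_list → Spec_eulerian_technique n adjacency_list (eulerian_technique n adjacency_list)

-- ===== LEMMAS AND PROOFS =====

theorem runB_nil (adj : List (List (Int × Int))) (fuel : Nat) (s : EState) :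
    runB adj fuel [] s = s := by cases fuel <;> simp [runB]

theorem runB_zero (adj : List (List (Int × Int)))
    (stack : List (Int × Int × Option (List (Int × Int)))) (s : EState) :
    runB adj 0 stack s = s := by cases stack <;> simp [runB]

-- The simulation: a stack frame behaves exactly like the corresponding A-side call,
-- and the two sides consume fuel identically.
theorem sim (fuel : Nat) :
    (∀ (adj : List (List (Int × Int))) (c p : Int) (s : EState)
        (rest : List (Int × Int × Option (List (Int × Int)))),
      runB adj fuel ((c, p, none) :: rest) s =
        runB adj (dfsA adj fuel c p s).2.1 rest (dfsA adj fuel c p s).1) ∧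
    (∀ (adj : List (List (Int × Int))) (c p : Int) (items : List (Int × Int)) (s : EState)
        (rest : List (Int × Int × Option (List (Int × Int)))),
      runB adj fuel ((c, p, some items) :: rest) s =
        runB adj (loopA adj fuel c p items s).2.1 rest (loopA adj fuel c p items s).1) := by
  induction fuel using Nat.strong_induction_on with
  | _ fuel ih =>
    match fuel with
    | 0 =>
      constructor
      · intro adj c p s rest; simp [runB, dfsA, runB_zero]
      · intro adj c p items s rest; simp [runB, loopA, runB_zero]
    | f+1 =>
      constructor
      · intro adj c p s rest
        simp only [runB, dfsA]
        exact (ih f (Nat.lt_succ_self f)).2 adj c p (pgetL adj c) _ rest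
      · intro adj c p items s rest
        match items with
        | [] => simp [runB, loopA]
        | (nxt, w) :: ps =>
          by_cases hnp : nxt = p
          · simp only [runB, loopA, hnp, ne_eq, not_true_eq_false, if_false]
            exact (ih f (Nat.lt_succ_self f)).2 adj c p ps s rest
          · simp only [runB, loopA, ne_eq, hnp, not_false_eq_true, if_true]
            rw [(ih f (Nat.lt_succ_self f)).1]
            exact (ih (dfsA adj f nxt c _).2.1
              (Nat.lt_succ_of_le (dfsA adj f nxt c _).2.2)).2 adj c p ps _ rest

-- ===== VERDICT (by name: the statement is the Claim_ definition above) =====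
theorem eulerian_technique_spec : Claim_equal_eulerian_technique := by
  intro n adj _ _
  unfold Spec_eulerian_technique
  simp only [eulerian_technique, eulerian_technique_alt]
  rw [(sim (fuelFor n adj)).1, runB_nil]
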